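-- pv_equiv track=rewrite | github.com/pirl-unc/presto | data/groove.py | find_cys_pairs
-- ===== SOURCE A (Python) =====
-- from typing import Iterable, Mapping, Optional, Sequence
--
-- IG_SEP_MIN = 48
--
-- IG_SEP_MAX = 72
--
-- def _clean_seq(sequence: Optional[str]) -> str:
--     return "".join(ch for ch in str(sequence or "").strip().upper() if not ch.isspace())
--
-- def find_cys_pairs(
--     seq: str,
--     min_sep: int = IG_SEP_MIN,
--     max_sep: int = IG_SEP_MAX,
-- ) -> list[tuple[int, int, int]]:
--     """Find all Cys-Cys pairs with plausible Ig-fold separation."""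
--
--     cleaned = _clean_seq(seq)
--     cys_positions = [idx for idx, aa in enumerate(cleaned) if aa == "C"]
--     pairs: list[tuple[int, int, int]] = []
--     for i, c1 in enumerate(cys_positions):
--         for c2 in cys_positions[i + 1 :]:
--             sep = c2 - c1
--             if sep < min_sep:
--                 continue
--             if sep > max_sep:
--                 break
--             pairs.append((c1, c2, sep))
--     return pairs
-- ===== SOURCE B (Python) =====
-- from bisect import bisect_left, bisect_right
-- from typing import Optional
--
-- IG_SEP_MIN = 48
--
-- IG_SEP_MAX = 72
--
-- def _clean_seq(sequence: Optional[str]) -> str: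
--     return "".join(ch for ch in str(sequence or "").strip().upper() if not ch.isspace())
--
-- def find_cys_pairs(
--     seq: str,
--     min_sep: int = IG_SEP_MIN,
--     max_sep: int = IG_SEP_MAX,
-- ) -> list[tuple[int, int, int]]:
--     """Find all Cys-Cys pairs with plausible Ig-fold separation.
--
--     Same cleaned sequence and Cys index list as before, but the admissible
--     partners of each Cys are located by binary search over the sorted index
--     list instead of an inner continue/break scan.
--     """
--     cleaned = _clean_seq(seq)
--     cys = [idx for idx, aa in enumerate(cleaned) if aa == "C"]
--     pairs: list[tuple[int, int, int]] = []
--     for i, c1 in enumerate(cys):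
--         rest = cys[i + 1 :]
--         lo = bisect_left(rest, c1 + min_sep)
--         hi = bisect_right(rest, c1 + max_sep)
--         pairs += [(c1, c2, c2 - c1) for c2 in rest[lo:hi]]
--     return pairs
-- ===== Notes on version B (the rewrite author's own statement) =====
-- stated objective: idiomatic
-- what changed: The inner continue/break linear scan over the remaining Cys indices is replaced by bisect_left/bisect_right binary searches that locate the admissible separation window directly, then a single slice is emitted.
import Mathlib
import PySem

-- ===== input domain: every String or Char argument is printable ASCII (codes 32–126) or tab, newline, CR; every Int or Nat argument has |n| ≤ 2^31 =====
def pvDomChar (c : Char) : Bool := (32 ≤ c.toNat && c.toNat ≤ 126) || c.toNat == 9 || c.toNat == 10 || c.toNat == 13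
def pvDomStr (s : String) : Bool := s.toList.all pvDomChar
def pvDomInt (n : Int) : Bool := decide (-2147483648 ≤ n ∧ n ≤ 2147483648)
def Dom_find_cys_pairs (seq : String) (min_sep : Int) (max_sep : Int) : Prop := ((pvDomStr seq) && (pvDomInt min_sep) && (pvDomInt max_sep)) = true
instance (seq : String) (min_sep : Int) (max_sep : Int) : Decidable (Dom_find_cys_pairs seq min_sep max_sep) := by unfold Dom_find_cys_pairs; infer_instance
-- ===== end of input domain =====

-- B replaces A's inner continue/break scan by bisect_left/bisect_right window lookup over the
-- same sorted Cys-index list (objective: idiomatic; return values identical).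

-- ===== PORT A =====

-- _clean_seq, shared verbatim by both Pythons; the cleaned string is kept as its list of
-- characters (the only use is iterating over its characters)
def pvCleanSeq (sequence : String) : List Char :=
  -- str(sequence or "") : "" if the string is empty, else the string itself
  let s := if sequence = "" then "" else sequence
  (PySem.Chars.upper (PySem.Chars.strip s.toList)).filter (fun ch => !PySem.Chars.isspace ch)

-- [idx for idx, aa in enumerate(cleaned) if aa == "C"], identical line in both Pythons
def pvCysPositions (cleaned : List Char) : List Int :=
  ((PySem.List.enumerate cleaned).filter (fun p => p.2 == 'C')).map (fun p => p.1)

-- A's inner 'for c2 in cys_positions[i+1:]' loop with continue/break, accumulating into pairs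
def pvLoopA (c1 min_sep max_sep : Int) : List Int → List (Int × Int × Int) → List (Int × Int × Int)
  | [], pairs => pairs
  | c2 :: rest, pairs =>
    let sep := c2 - c1
    if sep < min_sep then pvLoopA c1 min_sep max_sep rest pairs
    else if sep > max_sep then pairs
    else pvLoopA c1 min_sep max_sep rest (pairs ++ [(c1, c2, sep)])

def find_cys_pairs (seq : String) (min_sep : Int) (max_sep : Int) : List (Int × Int × Int) :=
  let cleaned := pvCleanSeq seq
  let cys := pvCysPositions cleaned
  (PySem.List.enumerate cys).foldl
    (fun pairs ic => pvLoopA ic.2 min_sep max_sep (PySem.List.slice cys (some (ic.1 + 1)) none) pairs)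
    []

-- ===== PORT B =====

def find_cys_pairs_alt (seq : String) (min_sep : Int) (max_sep : Int) : List (Int × Int × Int) :=
  let cleaned := pvCleanSeq seq
  let cys := pvCysPositions cleaned
  (PySem.List.enumerate cys).foldl
    (fun pairs ic =>
      let rest := PySem.List.slice cys (some (ic.1 + 1)) none
      let lo := PySem.List.bisectLeft rest (ic.2 + min_sep)
      let hi := PySem.List.bisectRight rest (ic.2 + max_sep)
      pairs ++ (PySem.List.slice rest (some (lo : Int)) (some (hi : Int))).map
        (fun c2 => (ic.2, c2, c2 - ic.2)))
    []

-- ===== PRECONDITION & SPEC =====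
def Spec_find_cys_pairs (seq : String) (min_sep : Int) (max_sep : Int) (out : List (Int × Int × Int)) : Prop := out = find_cys_pairs_alt seq min_sep max_sep
instance (seq : String) (min_sep : Int) (max_sep : Int) (out : List (Int × Int × Int)) : Decidable (Spec_find_cys_pairs seq min_sep max_sep out) := by unfold Spec_find_cys_pairs; infer_instance

-- ===== CLAIM (what is proved, stated in full; the proofs are below) =====
def Claim_equal_find_cys_pairs : Prop := ∀ (seq : String) (min_sep : Int) (max_sep : Int), Dom_find_cys_pairs seq min_sep max_sep → Spec_find_cys_pairs seq min_sep max_sep (find_cys_pairs seq min_sep max_sep)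

-- ===== LEMMAS AND PROOFS =====

-- the Cys-index list is sorted (strictly increasing enumeration indices)
theorem pvCys_sorted (cleaned : List Char) : (pvCysPositions cleaned).Pairwise (· ≤ ·) := by
  unfold pvCysPositions
  rw [List.pairwise_map]
  exact ((PySem.List.pairwise_lt_enumerate cleaned 0).imp (fun h => le_of_lt h)).filter _

-- A's continue/break loop on a sorted list appends exactly the window elements
theorem pvLoopA_eq (c1 m M : Int) (l : List Int) (acc : List (Int × Int × Int))
    (hs : l.Pairwise (· ≤ ·)) :
    pvLoopA c1 m M l acc =
      acc ++ (l.filter (fun c2 => !decide (c2 - c1 < m) && !decide (c2 - c1 > M))).map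
        (fun c2 => (c1, c2, c2 - c1)) := by
  induction l generalizing acc with
  | nil => simp [pvLoopA]
  | cons c2 rest ih =>
    rw [List.pairwise_cons] at hs
    obtain ⟨hall, hrest⟩ := hs
    by_cases h1 : c2 - c1 < m
    · simp [pvLoopA, h1, ih acc hrest]
    · by_cases h2 : c2 - c1 > M
      · have hfilter : rest.filter (fun c2 => !decide (c2 - c1 < m) && !decide (c2 - c1 > M)) = [] := by
          rw [List.filter_eq_nil_iff]
          intro e he
          have := hall e he
          simp only [Bool.and_eq_true, Bool.not_eq_true', decide_eq_false_iff_not]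
          intro _
          omega
        simp [pvLoopA, h1, h2, hfilter]
      · simp only [pvLoopA, if_neg h1, if_neg h2]
        rw [ih _ hrest]
        simp [h1, h2]

-- the element right after a takeWhile prefix fails the predicate
theorem pv_takeWhile_boundary {α : Type} (p : α → Bool) (l : List α)
    (h : (l.takeWhile p).length < l.length) : p (l[(l.takeWhile p).length]'h) = false := by
  have hd : l.dropWhile p ≠ [] := by
    intro hnil
    have := l.takeWhile_append_dropWhile (p := p)
    rw [hnil, List.append_nil] at this
    rw [this] at h; omega
  have key : l[(l.takeWhile p).length]? = (l.dropWhile p).head? := by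
    obtain ⟨t, ht⟩ : ∃ t, t = (l.takeWhile p).length := ⟨_, rfl⟩
    rw [← ht]
    conv_lhs => rw [← l.takeWhile_append_dropWhile (p := p)]
    rw [List.getElem?_append_right (by omega), ht, Nat.sub_self, ← List.head?_eq_getElem?]
  rw [List.getElem?_eq_getElem h, List.head?_eq_some_head hd] at key
  have := List.head_dropWhile_not p hd
  rw [← Option.some_inj.mp key] at this
  exact this

theorem pvBisectLeft_eq (xs : List Int) (x : Int) (hs : xs.Pairwise (· ≤ ·)) :
    PySem.List.bisectLeft xs x = (xs.takeWhile (fun y => decide (y < x))).length := by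
  obtain ⟨hle, hlt, hge⟩ := PySem.List.bisectLeft_spec xs x hs
  have htle : (xs.takeWhile (fun y => decide (y < x))).length ≤ xs.length :=
    (xs.takeWhile_prefix _).length_le
  rcases Nat.lt_trichotomy (PySem.List.bisectLeft xs x) (xs.takeWhile (fun y => decide (y < x))).length with h|h|h
  · exfalso
    have hn : PySem.List.bisectLeft xs x < xs.length := lt_of_lt_of_le h htle
    have h1 : (xs.takeWhile (fun y => decide (y < x)))[PySem.List.bisectLeft xs x]'h = xs[PySem.List.bisectLeft xs x]'hn :=
      (xs.takeWhile_prefix _).getElem _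
    have hmem : (xs.takeWhile (fun y => decide (y < x)))[PySem.List.bisectLeft xs x]'h ∈ xs.takeWhile (fun y => decide (y < x)) := List.getElem_mem h
    have h2 := List.mem_takeWhile_imp hmem
    rw [h1] at h2
    have h3 := hge _ hn le_rfl
    simp only [decide_eq_true_eq] at h2
    omega
  · exact h
  · exfalso
    have htlen : (xs.takeWhile (fun y => decide (y < x))).length < xs.length := lt_of_lt_of_le h hle
    have h2 := hlt _ htlen h
    have h3 := pv_takeWhile_boundary (fun y => decide (y < x)) xs htlen
    simp only [decide_eq_false_iff_not] at h3
    omega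

theorem pvBisectRight_eq (xs : List Int) (x : Int) (hs : xs.Pairwise (· ≤ ·)) :
    PySem.List.bisectRight xs x = (xs.takeWhile (fun y => decide (y ≤ x))).length := by
  obtain ⟨hle, hlt, hge⟩ := PySem.List.bisectRight_spec xs x hs
  have htle : (xs.takeWhile (fun y => decide (y ≤ x))).length ≤ xs.length :=
    (xs.takeWhile_prefix _).length_le
  rcases Nat.lt_trichotomy (PySem.List.bisectRight xs x) (xs.takeWhile (fun y => decide (y ≤ x))).length with h|h|h
  · exfalso
    have hn : PySem.List.bisectRight xs x < xs.length := lt_of_lt_of_le h htle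
    have h1 : (xs.takeWhile (fun y => decide (y ≤ x)))[PySem.List.bisectRight xs x]'h = xs[PySem.List.bisectRight xs x]'hn :=
      (xs.takeWhile_prefix _).getElem _
    have hmem : (xs.takeWhile (fun y => decide (y ≤ x)))[PySem.List.bisectRight xs x]'h ∈ xs.takeWhile (fun y => decide (y ≤ x)) := List.getElem_mem h
    have h2 := List.mem_takeWhile_imp hmem
    rw [h1] at h2
    have h3 := hge _ hn le_rfl
    simp only [decide_eq_true_eq] at h2
    omega
  · exact h
  · exfalso
    have htlen : (xs.takeWhile (fun y => decide (y ≤ x))).length < xs.length := lt_of_lt_of_le h hle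
    have h2 := hlt _ htlen h
    have h3 := pv_takeWhile_boundary (fun y => decide (y ≤ x)) xs htlen
    simp only [decide_eq_false_iff_not] at h3
    omega

-- the bisect window slice of a sorted list is the filter by the window condition
theorem pvWindow_eq (m M : Int) (l : List Int) (hs : l.Pairwise (· ≤ ·)) :
    (l.drop (l.takeWhile (fun y => decide (y < m))).length).take
        ((l.takeWhile (fun y => decide (y ≤ M))).length
          - (l.takeWhile (fun y => decide (y < m))).length) =
      l.filter (fun c2 => !decide (c2 < m) && decide (c2 ≤ M)) := by
  induction l with
  | nil => simp
  | cons x tail ih =>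
    rw [List.pairwise_cons] at hs
    obtain ⟨hall, htail⟩ := hs
    have IH := ih htail
    by_cases px : x < m
    · by_cases qx : x ≤ M
      · simpa [List.takeWhile_cons, px, qx, Nat.succ_sub_succ] using IH
      · have hnil : tail.filter (fun c2 => !decide (c2 < m) && decide (c2 ≤ M)) = [] := by
          rw [List.filter_eq_nil_iff]
          intro e he
          have := hall e he
          simp only [Bool.and_eq_true, Bool.not_eq_true', decide_eq_false_iff_not, decide_eq_true_eq]
          omega
        simp [px, qx, hnil]
    · by_cases qx : x ≤ M
      · have ha' : (tail.takeWhile (fun y => decide (y < m))).length = 0 := by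
          cases tail with
          | nil => simp
          | cons e t =>
            have := hall e (List.mem_cons_self ..)
            simp only [List.takeWhile_cons]
            have : ¬ (e < m) := by omega
            simp [this]
        rw [ha'] at IH
        simp only [List.drop_zero, Nat.sub_zero] at IH
        simp [px, qx, IH]
      · have hnil : tail.filter (fun c2 => !decide (c2 < m) && decide (c2 ≤ M)) = [] := by
          rw [List.filter_eq_nil_iff]
          intro e he
          have := hall e he
          simp only [Bool.and_eq_true, Bool.not_eq_true', decide_eq_false_iff_not, decide_eq_true_eq]
          omega
        simp [px, qx, hnil]

-- per-element equality of the two fold steps, then the verdict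
theorem find_cys_pairs_eq (seq : String) (min_sep max_sep : Int) :
    find_cys_pairs seq min_sep max_sep = find_cys_pairs_alt seq min_sep max_sep := by
  unfold find_cys_pairs find_cys_pairs_alt
  apply PySem.List.foldl_congr_mem
  intro acc ic _hmem
  have hsorted := pvCys_sorted (pvCleanSeq seq)
  rw [PySem.List.slice_some_none]
  have hrest : ((pvCysPositions (pvCleanSeq seq)).drop
      (PySem.List.clampIdx (pvCysPositions (pvCleanSeq seq)).length (ic.1 + 1))).Pairwise (· ≤ ·) :=
    hsorted.sublist (List.drop_sublist _ _)
  rw [pvLoopA_eq _ _ _ _ _ hrest]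
  dsimp only
  rw [pvBisectLeft_eq _ _ hrest, pvBisectRight_eq _ _ hrest, PySem.List.slice_natCast]
  rw [pvWindow_eq _ _ _ hrest]
  have hpred : ∀ c2 : Int,
      (!decide (c2 - ic.2 < min_sep) && !decide (c2 - ic.2 > max_sep)) =
      (!decide (c2 < ic.2 + min_sep) && decide (c2 ≤ ic.2 + max_sep)) := by
    intro c2
    by_cases h1 : c2 - ic.2 < min_sep <;> by_cases h2 : c2 - ic.2 > max_sep <;>
      simp [h1, h2] <;> omega
  rw [List.filter_congr (fun x _ => hpred x)]

-- ===== VERDICT (by name: the statement is the Claim_ definition above) =====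
theorem find_cys_pairs_spec : Claim_equal_find_cys_pairs := by
  intro seq min_sep max_sep _hdom
  unfold Spec_find_cys_pairs
  exact find_cys_pairs_eq seq min_sep max_sep
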